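-- pv_equiv track=rewrite | github.com/JingjieDu/Spinal-cord-injury-project | Wrighton-Sullivan_Pipeline.py | distributed_chunks
-- ===== SOURCE A (Python) =====
-- def distributed_chunks(l, n):
--     """
--     http://stackoverflow.com/a/6856593
--     Splits list l into n chunks with approximately equals sum of values
--     see http://stackoverflow.com/questions/6855394/splitting-list-in-chunks-of-balanced-weight
--     """
--     result = [[] for i in range(n)]
--     sums = {i: 0 for i in range(n)}
--     c = 0
--     for e in l:
--         for i in sums:
--             if c == sums[i]:
--                 result[i].append(e)
--                 break
--         sums[i] += e
--         c = min(sums.values())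
--     return result
-- ===== SOURCE B (Python) =====
-- def _insert_sorted(q, item):
--     # insert item into sorted list q, keeping it sorted by (sum, index)
--     for k in range(len(q)):
--         if item < q[k]:
--             return q[:k] + [item] + q[k:]
--     return q + [item]
--
-- def distributed_chunks(l, n):
--     chunks = [[] for _ in range(n)]
--     queue = [(0, i) for i in range(n)]  # sorted priority list of (chunk sum, chunk index)
--     for e in l:
--         s, i = queue[0]
--         chunks[i].append(e)
--         queue = _insert_sorted(queue[1:], (s + e, i))
--     return chunks
-- ===== Notes on version B (the rewrite author's own statement) =====
-- stated objective: alternative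
-- what changed: A scans the whole sums dict per element to find the first chunk at the minimum and then recomputes min(sums.values()); B keeps one sorted priority list of (sum, index) pairs, pops its front and re-inserts the updated pair at its ordered position, so no per-element full scan or min pass remains.
import Mathlib
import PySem

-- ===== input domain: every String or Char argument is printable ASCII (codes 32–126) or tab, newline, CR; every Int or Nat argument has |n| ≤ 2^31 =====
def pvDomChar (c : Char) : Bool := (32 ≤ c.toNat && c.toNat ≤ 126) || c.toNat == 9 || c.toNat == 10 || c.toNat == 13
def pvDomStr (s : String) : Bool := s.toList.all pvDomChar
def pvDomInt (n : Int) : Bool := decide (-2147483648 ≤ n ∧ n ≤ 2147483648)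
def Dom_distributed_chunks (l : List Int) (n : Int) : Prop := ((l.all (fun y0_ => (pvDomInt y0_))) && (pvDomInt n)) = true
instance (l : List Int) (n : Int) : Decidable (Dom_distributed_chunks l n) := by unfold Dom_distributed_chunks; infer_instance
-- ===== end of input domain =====

-- B replaces A's per-element linear scan of the sums dict (plus a min() pass) by a sorted
-- priority list of (sum, index) pairs: pop the front, re-insert at its ordered position.
-- Objective: alternative (same exact output; different data structure, not measurably faster).

-- ===== PORT A =====
-- A's state: (result, sums-in-key-order 0..n-1, c).  The dict `sums` has keys exactly
-- range(n) in insertion order, so it is ported as the list of its values in key order.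
def pvStepA (st : List (List Int) × List Int × Int) (e : Int) :
    List (List Int) × List Int × Int :=
  -- `for i in sums: if c == sums[i]: result[i].append(e); break` — first key whose sum is c
  match st.2.1.findIdx? (fun s => st.2.2 == s) with
  | some j =>
      let res := st.1.set j (st.1.getD j [] ++ [e])
      let sums := st.2.1.set j (st.2.1.getD j 0 + e)
      (res, sums, (PySem.List.min? sums (fun x => x)).getD st.2.2)
  | none =>
      -- loop fell through without break: i is the last key, no append happens
      -- (unreachable when c = min(sums.values()); for n ≤ 0, l ≠ [] Python raises — outside Pre_)
      let j := st.2.1.length - 1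
      let sums := st.2.1.set j (st.2.1.getD j 0 + e)
      (st.1, sums, (PySem.List.min? sums (fun x => x)).getD st.2.2)

def distributed_chunks (l : List Int) (n : Int) : List (List Int) :=
  (l.foldl pvStepA (List.replicate n.toNat [], List.replicate n.toNat 0, 0)).1

-- ===== PORT B =====
-- Python tuple comparison (s1,i1) < (s2,i2), lexicographic
def pvQltB (a b : Int × Nat) : Bool := a.1 < b.1 || (a.1 == b.1 && a.2 < b.2)

-- _insert_sorted: scan for the first entry the item precedes, insert there
def pvInsertSorted (x : Int × Nat) : List (Int × Nat) → List (Int × Nat)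
  | [] => [x]
  | q :: rest => if pvQltB x q then x :: q :: rest else q :: pvInsertSorted x rest

def pvStepB (st : List (List Int) × List (Int × Nat)) (e : Int) :
    List (List Int) × List (Int × Nat) :=
  match st.2 with
  | [] => st   -- queue[0] raises IndexError in Python (n ≤ 0 with l ≠ []); outside Pre_
  | (s, i) :: rest => (st.1.set i (st.1.getD i [] ++ [e]), pvInsertSorted (s + e, i) rest)

def distributed_chunks_alt (l : List Int) (n : Int) : List (List Int) :=
  (l.foldl pvStepB
    (List.replicate n.toNat [], (List.range n.toNat).map (fun i => ((0 : Int), i)))).1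

-- ===== PRECONDITION & SPEC =====
-- Pre_ excludes only n ≤ 0 with a nonempty l, where BOTH Pythons raise
-- (A: UnboundLocalError on `sums[i] += e`; B: IndexError on `queue[0]`).
def Pre_distributed_chunks (l : List Int) (n : Int) : Prop := 1 ≤ n ∨ l = []
instance (l : List Int) (n : Int) : Decidable (Pre_distributed_chunks l n) := by
  unfold Pre_distributed_chunks; infer_instance

def pvWitness_distributed_chunks : List Int × Int := ([5, 1, 4, 2, 3], 2)

def Spec_distributed_chunks (l : List Int) (n : Int) (out : List (List Int)) : Prop :=
  out = distributed_chunks_alt l n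
instance (l : List Int) (n : Int) (out : List (List Int)) :
    Decidable (Spec_distributed_chunks l n out) := by unfold Spec_distributed_chunks; infer_instance

-- ===== CLAIM (what is proved, stated in full; the proofs are below) =====
def Claim_equal_distributed_chunks : Prop :=
  ∀ (l : List Int) (n : Int), Dom_distributed_chunks l n → Pre_distributed_chunks l n →
    Spec_distributed_chunks l n (distributed_chunks l n)

-- ===== LEMMAS AND PROOFS =====

-- strict lexicographic order on (sum, index), Prop form of pvQltB
def pvQlt (a b : Int × Nat) : Prop := a.1 < b.1 ∨ (a.1 = b.1 ∧ a.2 < b.2)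

lemma pvQltB_iff (a b : Int × Nat) : pvQltB a b = true ↔ pvQlt a b := by
  simp [pvQltB, pvQlt]

lemma pvQlt_trans {a b c : Int × Nat} (h1 : pvQlt a b) (h2 : pvQlt b c) : pvQlt a c := by
  rcases h1 with h1 | ⟨h1, h1'⟩ <;> rcases h2 with h2 | ⟨h2, h2'⟩ <;>
    simp [pvQlt] <;> omega

lemma pvQlt_of_not (a b : Int × Nat) (hne : a.2 ≠ b.2) (h : pvQltB a b = false) : pvQlt b a := by
  simp [pvQltB] at h
  rcases h with ⟨h1, h2⟩
  simp [pvQlt]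
  omega

lemma pvInsertSorted_perm (x : Int × Nat) (q : List (Int × Nat)) :
    (pvInsertSorted x q).Perm (x :: q) := by
  induction q with
  | nil => simp [pvInsertSorted]
  | cons a t ih =>
      simp only [pvInsertSorted]
      split
      · exact List.Perm.refl _
      · exact (ih.cons a).trans (List.Perm.swap x a t)

lemma pvInsertSorted_pairwise (x : Int × Nat) (q : List (Int × Nat))
    (hq : q.Pairwise pvQlt) (hne : ∀ p ∈ q, p.2 ≠ x.2) :
    (pvInsertSorted x q).Pairwise pvQlt := by
  induction q with
  | nil => simp [pvInsertSorted]
  | cons a t ih =>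
      rw [List.pairwise_cons] at hq
      simp only [pvInsertSorted]
      split
      · rename_i hxa
        rw [pvQltB_iff] at hxa
        refine List.pairwise_cons.mpr ⟨?_, List.pairwise_cons.mpr hq⟩
        intro p hp
        rw [List.mem_cons] at hp
        rcases hp with h | hp
        · exact h ▸ hxa
        · exact pvQlt_trans hxa (hq.1 p hp)
      · rename_i hxa
        rw [Bool.not_eq_true] at hxa
        have hax : pvQlt a x :=
          pvQlt_of_not x a (fun h => hne a (by simp) h.symm) hxa
        refine List.pairwise_cons.mpr ⟨?_, ih hq.2 (fun p hp => hne p (by simp [hp]))⟩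
        intro p hp
        have hmem := (pvInsertSorted_perm x t).mem_iff.mp hp
        rw [List.mem_cons] at hmem
        rcases hmem with h | h
        · exact h ▸ hax
        · exact hq.1 p h

lemma pvZipIdx_nodup (l : List Int) : l.zipIdx.Nodup := by
  apply List.Nodup.of_map Prod.snd
  simp
  exact (List.nodup_range' (n := l.length))

lemma pvZipIdx_set (l : List Int) (i : Nat) (v : Int) :
    (l.set i v).zipIdx = l.zipIdx.set i (v, i) := by
  apply List.ext_getElem <;> simp
  intro k hk hk2
  rw [List.getElem_set]
  split <;> simp_all

-- the bisimulation between A's state (result, sums, c) and B's state (chunks, queue)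
def pvRel (a : List (List Int) × List Int × Int) (b : List (List Int) × List (Int × Nat)) : Prop :=
  a.1 = b.1 ∧ a.2.1 ≠ [] ∧ a.2.2 = (PySem.List.min? a.2.1 (fun x => x)).getD 0 ∧
  b.2.Perm a.2.1.zipIdx ∧ b.2.Pairwise pvQlt

lemma pvRel_step (a : List (List Int) × List Int × Int)
    (b : List (List Int) × List (Int × Nat)) (e : Int) (h : pvRel a b) :
    pvRel (pvStepA a e) (pvStepB b e) := by
  obtain ⟨res, sums, c⟩ := a
  obtain ⟨chunks, q⟩ := b
  obtain ⟨hres, hne, hc, hperm, hpair⟩ := h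
  simp only at hres hne hc hperm hpair
  -- the queue is nonempty
  have hql : q.length = sums.length := by
    simpa using hperm.length_eq
  obtain ⟨⟨s, i⟩, rest, rfl⟩ : ∃ p t, q = p :: t := by
    cases q with
    | nil => exact absurd (by simpa using hql.symm) hne
    | cons p t => exact ⟨p, t, rfl⟩
  -- head facts
  have hmemq : ((s, i) : Int × Nat) ∈ sums.zipIdx := hperm.subset (by simp)
  have hsi' : sums[i]? = some s := List.mk_mem_zipIdx_iff_getElem?.mp hmemq
  have hi : i < sums.length := by
    by_contra h
    rw [List.getElem?_eq_none (Nat.le_of_not_lt h)] at hsi'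
    cases hsi'
  have hsi : sums[i] = s := by
    rw [List.getElem?_eq_getElem hi] at hsi'
    exact Option.some_inj.mp hsi'
  -- the head is minimal among all (value, index) pairs
  have hhead : ∀ p ∈ sums.zipIdx, p = (s, i) ∨ pvQlt (s, i) p := by
    intro p hp
    have : p ∈ (s, i) :: rest := hperm.symm.subset hp
    rcases this with _ | hp'
    · left; rfl
    · right; exact (List.pairwise_cons.mp hpair).1 p (by assumption)
  have hmin_all : ∀ y ∈ sums, s ≤ y := by
    intro y hy
    obtain ⟨k, hk, rfl⟩ := List.mem_iff_getElem.mp hy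
    have hmem : ((sums[k], k) : Int × Nat) ∈ sums.zipIdx :=
      List.mk_mem_zipIdx_iff_getElem?.mpr (List.getElem?_eq_getElem hk)
    rcases hhead _ hmem with hEq | hlt
    · rw [show sums[k] = s from congrArg Prod.fst hEq]
    · rcases hlt with h | ⟨h, _⟩ <;> omega
  -- c equals the head's sum
  obtain ⟨m, hm⟩ : ∃ m, PySem.List.min? sums (fun x => x) = some m :=
    Option.ne_none_iff_exists'.mp
      ((PySem.List.min?_eq_none_iff (xs := sums) (key := fun x => x)).ne.mpr hne)
  have hcs : c = s := by
    have hmmem := PySem.List.min?_mem hm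
    have hmle := PySem.List.min?_isMin hm
    have h1 : m ≤ s := hmle s (hsi ▸ List.getElem_mem hi)
    have h2 : s ≤ m := hmin_all m hmmem
    rw [hc, hm]; simp; omega
  -- A's inner loop finds exactly index i
  have hfind : sums.findIdx? (fun x => c == x) = some i := by
    rw [List.findIdx?_eq_some_iff_getElem]
    refine ⟨hi, by simp [hsi, hcs], ?_⟩
    intro k hk
    simp only [beq_iff_eq]
    intro hEq
    have hmem : ((s, k) : Int × Nat) ∈ sums.zipIdx := by
      apply List.mk_mem_zipIdx_iff_getElem?.mpr
      rw [List.getElem?_eq_getElem (by omega)]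
      simp [← hEq, hcs]
    rcases hhead _ hmem with hEq' | hlt
    · have : k = i := congrArg Prod.snd hEq'
      omega
    · rcases hlt with h | ⟨_, h⟩ <;> omega
  -- nodup of the queue, hence rest avoids index i
  have hnodup : ((s, i) :: rest).Nodup := hperm.nodup_iff.mpr (pvZipIdx_nodup sums)
  have hrest_ne : ∀ p ∈ rest, p.2 ≠ i := by
    intro p hp hpi
    have hpz : p ∈ sums.zipIdx := hperm.subset (by simp [hp])
    have hget : sums[p.2]? = some p.1 := List.mk_mem_zipIdx_iff_getElem?.mp (by simpa using hpz)
    rw [hpi, List.getElem?_eq_getElem hi] at hget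
    have hps : p = (s, i) := by
      have h1 : p.1 = s := by rw [← hsi]; exact (Option.some_inj.mp hget).symm
      exact Prod.ext h1 hpi
    exact (List.nodup_cons.mp hnodup).1 (hps ▸ hp)
  -- rest is a permutation of the pairs with index i removed
  have hzi : i < sums.zipIdx.length := by simpa using hi
  have hzget : sums.zipIdx[i]'hzi = (s, i) := by simp [hsi]
  have hrest : rest.Perm (sums.zipIdx.eraseIdx i) := by
    have h0 := List.set_perm_cons_eraseIdx hzi ((s, i) : Int × Nat)
    rw [show sums.zipIdx.set i (s, i) = sums.zipIdx by rw [← hzget]; exact List.set_getElem_self hzi] at h0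
    exact (hperm.trans h0).cons_inv
  -- evaluate both steps
  have hgd : sums.getD i 0 = s := by rw [List.getD_eq_getElem _ _ hi, hsi]
  simp only [pvStepA, pvStepB, hfind, hgd]
  refine ⟨by rw [hres], by simp [hne], ?_, ?_, ?_⟩
  · -- c' is min of the new sums, with either default
    obtain ⟨m', hm'⟩ : ∃ m', PySem.List.min? (sums.set i (s + e)) (fun x => x) = some m' :=
      Option.ne_none_iff_exists'.mp
        ((PySem.List.min?_eq_none_iff (xs := sums.set i (s + e)) (key := fun x => x)).ne.mpr
          (by simp [hne]))
    simp [hm']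
  · -- queue permutation
    have h1 : (pvInsertSorted (s + e, i) rest).Perm ((s + e, i) :: rest) :=
      pvInsertSorted_perm _ _
    have h2 : ((s + e, i) :: rest).Perm ((s + e, i) :: sums.zipIdx.eraseIdx i) :=
      hrest.cons _
    have h3 : ((s + e, i) :: sums.zipIdx.eraseIdx i).Perm (sums.zipIdx.set i (s + e, i)) :=
      (List.set_perm_cons_eraseIdx hzi ((s + e, i) : Int × Nat)).symm
    rw [pvZipIdx_set]
    exact (h1.trans h2).trans h3
  · -- queue sortedness
    exact pvInsertSorted_pairwise _ _ (List.pairwise_cons.mp hpair).2 hrest_ne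

lemma pvRel_foldl (l : List Int) (a : List (List Int) × List Int × Int)
    (b : List (List Int) × List (Int × Nat)) (h : pvRel a b) :
    pvRel (l.foldl pvStepA a) (l.foldl pvStepB b) := by
  induction l generalizing a b with
  | nil => exact h
  | cons e t ih => exact ih _ _ (pvRel_step a b e h)

lemma pvRel_init (k : Nat) (hk : 1 ≤ k) :
    pvRel (List.replicate k [], List.replicate k 0, 0)
          (List.replicate k [], (List.range k).map (fun i => ((0 : Int), i))) := by
  have hz : (List.replicate k (0 : Int)).zipIdx = (List.range k).map (fun i => ((0 : Int), i)) := by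
    apply List.ext_getElem <;> simp
  refine ⟨rfl, by simp; omega, ?_, by rw [hz], ?_⟩
  · obtain ⟨m, hm⟩ : ∃ m, PySem.List.min? (List.replicate k (0 : Int)) (fun x => x) = some m :=
      Option.ne_none_iff_exists'.mp
        ((PySem.List.min?_eq_none_iff (xs := List.replicate k (0 : Int))
          (key := fun x => x)).ne.mpr (by simp; omega))
    have := PySem.List.min?_mem hm
    simp only [List.eq_of_mem_replicate this] at hm ⊢
    simp [hm]
  · rw [List.pairwise_map]
    exact List.pairwise_lt_range.imp (fun h => Or.inr ⟨rfl, h⟩)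

-- ===== VERDICT (by name: the statement is the Claim_ definition above) =====
theorem distributed_chunks_spec : Claim_equal_distributed_chunks := by
  intro l n _ hpre
  unfold Spec_distributed_chunks distributed_chunks distributed_chunks_alt
  rcases hpre with hn | rfl
  · have hk : 1 ≤ n.toNat := by omega
    exact (pvRel_foldl l _ _ (pvRel_init n.toNat hk)).1
  · rfl
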